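-- pv_equiv track=rewrite | github.com/daniel-reich/turbo-robot | ESAWnF3ySrFusHhYF_20.py | edit_words
-- ===== SOURCE A (Python) =====
-- def edit_words(lst):
--   ans=[]
--   for i in lst:
--     a=[]
--     if i=='':ans.append('-')
--     else:
--       for j in range(len(i)-1,-1,-1):
--         if j==len(i)//2:
--           a.append(i[j].upper())
--           a.append('-')
--         else:a.append(i[j].upper())
--       ans.append(''.join(a))
--   return ans
-- ===== SOURCE B (Python) =====
-- def _dashed(i):
--     r = i[::-1].upper()
--     m = (len(i) + 1) // 2
--     return r[:m] + '-' + r[m:]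
--
-- def edit_words(lst):
--     return [_dashed(i) for i in lst]
-- ===== Notes on version B (the rewrite author's own statement) =====
-- stated objective: simpler
-- what changed: Replaces A's backward per-character index loop with conditional dash insertion and an explicit empty-string branch by a list comprehension that reverses+uppercases each word with slicing and splices the dash in at the ceil-midpoint (the empty string yields '-' with no special case).
import Mathlib
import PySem

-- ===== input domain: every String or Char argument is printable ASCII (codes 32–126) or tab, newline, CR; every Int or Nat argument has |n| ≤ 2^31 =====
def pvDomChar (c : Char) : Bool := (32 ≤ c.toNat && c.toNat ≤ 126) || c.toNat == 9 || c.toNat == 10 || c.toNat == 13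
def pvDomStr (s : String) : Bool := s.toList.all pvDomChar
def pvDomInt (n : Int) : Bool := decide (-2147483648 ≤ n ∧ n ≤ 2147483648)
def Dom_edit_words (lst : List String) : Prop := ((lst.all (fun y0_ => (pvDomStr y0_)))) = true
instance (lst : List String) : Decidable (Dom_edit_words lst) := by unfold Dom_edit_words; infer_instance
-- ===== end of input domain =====

-- B replaces A's backward index loop (with per-character dash conditional and an
-- explicit empty-string branch) by reverse+uppercase via slicing and splicing the
-- dash in at the ceil-midpoint; objective: simpler.


-- ===== PORT A =====
-- i[j] is a one-character string in Python; ported as String.ofList [c] where c is the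
-- character PySem.Str.pyGet? returns (the index is always in range, so getD never fires).
def edit_words (lst : List String) : List String :=
  lst.foldl (fun ans i =>
    if i == "" then ans ++ ["-"]
    else
      let a : List String :=
        (PySem.List.pyRange (PySem.Str.len i - 1) (-1) (-1)).foldl (fun a j =>
          if j = PySem.Int.floordiv (PySem.Str.len i) 2 then
            a ++ [PySem.Str.upper (String.ofList [(PySem.Str.pyGet? i j).getD ' ']), "-"]
          else
            a ++ [PySem.Str.upper (String.ofList [(PySem.Str.pyGet? i j).getD ' '])]) []
      ans ++ [PySem.Str.join "" a]) []

-- ===== PORT B =====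
-- i[::-1] never raises (step -1 ≠ 0), so the getD "" never fires.
def pvDashed (i : String) : String :=
  let r := PySem.Str.upper ((PySem.Str.slice? i none none (-1)).getD "")
  let m := PySem.Int.floordiv (PySem.Str.len i + 1) 2
  PySem.Str.slice r none (some m) ++ "-" ++ PySem.Str.slice r (some m) none

def edit_words_alt (lst : List String) : List String :=
  lst.map pvDashed

-- ===== PRECONDITION & SPEC =====
def Spec_edit_words (lst : List String) (out : List String) : Prop := out = edit_words_alt lst
instance (lst : List String) (out : List String) : Decidable (Spec_edit_words lst out) := by unfold Spec_edit_words; infer_instance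

-- ===== CLAIM (what is proved, stated in full; the proofs are below) =====
def Claim_equal_edit_words : Prop := ∀ (lst : List String), Dom_edit_words lst → Spec_edit_words lst (edit_words lst)

-- ===== LEMMAS AND PROOFS =====

theorem pv_pyRange_desc (n : Nat) (hn : 0 < n) :
    PySem.List.pyRange ((n : Int) - 1) (-1) (-1) = (List.range n).map (fun k : Nat => (n : Int) - 1 - (k : Int)) := by
  simp only [PySem.List.pyRange]
  rw [if_neg (by norm_num)]
  have h1 : ¬ (0:Int) < -1 := by norm_num
  rw [if_neg h1, if_pos (by omega : (-1:Int) < (n:Int) - 1)]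
  have h2 : (((n:Int) - 1 - -1 + -(-1) - 1) / -(-1)) = (n : Int) := by norm_num
  rw [h2, Int.toNat_natCast]
  exact List.map_congr_left (fun k _ => by ring)

theorem pv_join_nil_flatten (parts : List (List Char)) : PySem.Chars.join [] parts = parts.flatten := by
  induction parts with
  | nil => simp [PySem.Chars.join, List.intercalate]
  | cons x xs ih =>
    cases xs with
    | nil => simp [PySem.Chars.join, List.intercalate]
    | cons y ys =>
      simp only [PySem.Chars.join, List.intercalate, List.intersperse, List.flatten_cons] at *
      simp [ih]

theorem pv_flatMap_noK (F : Nat → Char) (K : Nat) (l : List Nat) (hl : ∀ k ∈ l, k ≠ K) :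
    l.flatMap (fun k => if k = K then [F k, '-'] else [F k]) = l.map F := by
  induction l with
  | nil => simp
  | cons x xs ih =>
    simp only [List.flatMap_cons, List.map_cons, if_neg (hl x (by simp))]
    rw [ih (fun k hk => hl k (by simp [hk]))]
    rfl

theorem pv_flatMap_insert (F : Nat → Char) (n K : Nat) (hK : K < n) :
    (List.range n).flatMap (fun k => if k = K then [F k, '-'] else [F k])
    = ((List.range n).map F).take (K+1) ++ '-' :: ((List.range n).map F).drop (K+1) := by
  have hsplit : List.range n = List.range' 0 (K+1) ++ List.range' (K+1) (n-K-1) := by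
    have h := List.range'_append (s:=0) (m:=K+1) (n:=n-K-1) (step:=1)
    simp only [Nat.zero_add, Nat.one_mul] at h
    have hn : n = K+1+(n-K-1) := by omega
    rw [List.range_eq_range']
    conv_lhs => rw [hn]
    exact h.symm
  have h1 : List.range' 0 (K+1) = List.range' 0 K ++ [K] := by
    rw [List.range'_concat]; simp
  rw [hsplit, List.flatMap_append, h1, List.flatMap_append]
  rw [pv_flatMap_noK F K (List.range' 0 K) (fun k hk => by
    have := List.mem_range'.mp hk; omega)]
  rw [pv_flatMap_noK F K (List.range' (K+1) (n-K-1)) (fun k hk => by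
    have := List.mem_range'.mp hk; omega)]
  simp only [List.flatMap_cons, List.flatMap_nil, List.append_nil, List.map_append, if_true]
  have hlen : (List.map F (List.range' 0 K) ++ List.map F [K]).length = K + 1 := by simp
  rw [List.take_left' hlen, List.drop_left' hlen]
  simp [List.append_assoc]

theorem pv_flatten_flatMap {α β : Type} (h : α → List (List β)) (l : List α) :
    (l.flatMap h).flatten = l.flatMap (fun a => (h a).flatten) := by
  induction l <;> simp_all

theorem pv_map_range_rev (cs : List Char) (n : Nat) (h : n = cs.length) :
    ((List.range n).map (fun k => PySem.Chars.upperChar (cs[n-1-k]?.getD ' ')))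
    = List.map PySem.Chars.upperChar cs.reverse := by
  apply List.ext_getElem
  · simp [h]
  · intro j h1 h2
    have hjn : j < n := by simpa using h1
    simp only [List.getElem_map, List.getElem_range, List.getElem_reverse]
    have hj : n - 1 - j < cs.length := by omega
    rw [List.getElem?_eq_getElem hj]
    simp [h]

theorem pv_word_eq (i : String) :
    (if i == "" then "-"
     else PySem.Str.join ""
       ((PySem.List.pyRange (PySem.Str.len i - 1) (-1) (-1)).foldl (fun a j =>
          if j = PySem.Int.floordiv (PySem.Str.len i) 2 then
            a ++ [PySem.Str.upper (String.ofList [(PySem.Str.pyGet? i j).getD ' ']), "-"]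
          else
            a ++ [PySem.Str.upper (String.ofList [(PySem.Str.pyGet? i j).getD ' '])]) []))
    = pvDashed i := by
  by_cases hi : i = ""
  · subst hi; decide
  · have hne : (i == "") = false := by simpa using hi
    rw [hne]
    simp only [Bool.false_eq_true, if_false]
    set cs := i.toList with hcs
    set n := cs.length with hn
    have hn0 : 0 < n := by
      have h0 : cs ≠ [] := by simpa [hcs, String.toList_inj] using hi
      exact List.length_pos_of_ne_nil h0
    set K : Nat := n - 1 - n/2 with hK
    have hKn : K < n := by omega
    -- normalize len
    have hlen : PySem.Str.len i = (n : Int) := by rw [PySem.Str.len_eq]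
    have hfd : PySem.Int.floordiv (n : Int) 2 = ((n/2 : Nat) : Int) := by
      exact_mod_cast PySem.Int.floordiv_natCast n 2
    have hemp : ("" : String).toList = [] := by decide
    have hdash : ("-" : String).toList = ['-'] := by decide
    have htl : ∀ c : Char, (PySem.Str.upper (String.ofList [c])).toList = [PySem.Chars.upperChar c] := by
      intro c
      rw [PySem.Str.toList_upper, String.toList_ofList]
      simp [PySem.Chars.upper]
    apply String.toList_inj.mp
    rw [PySem.Str.toList_join, hemp, hlen, pv_pyRange_desc n hn0, List.foldl_map]
    -- rewrite loop body
    rw [PySem.List.foldl_congr_mem (List.range n) _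
      (fun a k => a ++ (if k = K then
          [PySem.Str.upper (String.ofList [((cs[n-1-k]?).getD ' ')]), "-"]
        else
          [PySem.Str.upper (String.ofList [((cs[n-1-k]?).getD ' ')])])) []
      ?_]
    · rw [PySem.List.foldl_append_eq_flatMap]
      simp only [List.nil_append]
      rw [pv_join_nil_flatten, List.map_flatMap, pv_flatten_flatMap]
      simp only [apply_ite (List.map String.toList), apply_ite List.flatten,
        List.map_cons, List.map_nil, htl, hdash, List.flatten_cons, List.flatten_nil,
        List.append_nil, List.singleton_append]
      rw [pv_flatMap_insert (fun k => PySem.Chars.upperChar (cs[n-1-k]?.getD ' ')) n K hKn]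
      rw [pv_map_range_rev cs n hn]
      -- now the B side
      have h0 : Option.map String.toList (PySem.Str.slice? i none none (-1)) = some cs.reverse := by
        rw [PySem.Str.slice?_map]
        simp [PySem.Chars.slice?_eq_listSlice?, PySem.List.slice?_none_none_neg_one, hcs]
      obtain ⟨w, hw, hwt⟩ : ∃ w, PySem.Str.slice? i none none (-1) = some w ∧ w.toList = cs.reverse := by
        cases h : PySem.Str.slice? i none none (-1) with
        | none => rw [h] at h0; simp at h0
        | some w => rw [h] at h0; simp at h0; exact ⟨w, rfl, h0⟩
      have hm : PySem.Int.floordiv ((n:Int) + 1) 2 = (((n+1)/2 : Nat) : Int) := by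
        rw [show ((n:Int)+1) = (((n+1:Nat)):Int) by push_cast; ring]
        exact_mod_cast PySem.Int.floordiv_natCast (n+1) 2
      have hKM : K + 1 = (n+1)/2 := by omega
      unfold pvDashed
      simp only [hw, Option.getD_some, hlen, hm]
      rw [String.toList_append, String.toList_append, hdash,
        PySem.Str.toList_slice, PySem.Str.toList_slice,
        PySem.Chars.slice_eq_listSlice, PySem.Chars.slice_eq_listSlice,
        PySem.List.slice_to _ (by positivity), PySem.List.slice_from _ (by positivity)]
      rw [PySem.Str.toList_upper, hwt]
      simp only [PySem.Chars.upper, hKM, List.append_assoc, List.singleton_append]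
      rw [Int.toNat_natCast]
    · intro acc k hk
      dsimp only
      have hklt : k < n := List.mem_range.mp hk
      have hidx : (n : Int) - 1 - (k : Int) = ((n-1-k : Nat) : Int) := by omega
      rw [hidx, hfd, PySem.Str.pyGet?_natCast, ← hcs]
      by_cases hkK : k = K
      · rw [if_pos (by omega), if_pos hkK]
      · rw [if_neg (by omega), if_neg hkK]

theorem pv_fold_eq (lst : List String) (acc : List String) :
    lst.foldl (fun ans i =>
      if i == "" then ans ++ ["-"]
      else
        let a : List String :=
          (PySem.List.pyRange (PySem.Str.len i - 1) (-1) (-1)).foldl (fun a j =>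
            if j = PySem.Int.floordiv (PySem.Str.len i) 2 then
              a ++ [PySem.Str.upper (String.ofList [(PySem.Str.pyGet? i j).getD ' ']), "-"]
            else
              a ++ [PySem.Str.upper (String.ofList [(PySem.Str.pyGet? i j).getD ' '])]) []
        ans ++ [PySem.Str.join "" a]) acc = acc ++ lst.map pvDashed := by
  induction lst generalizing acc with
  | nil => simp
  | cons x xs ih =>
    simp only [List.foldl_cons, List.map_cons]
    rw [ih]
    have hx := pv_word_eq x
    by_cases hx0 : x == ""
    · simp only [if_pos hx0] at hx ⊢
      rw [hx]; simp
    · simp only [if_neg hx0] at hx ⊢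
      rw [hx]; simp

-- ===== VERDICT (by name: the statement is the Claim_ definition above) =====
theorem edit_words_spec : Claim_equal_edit_words := by
  intro lst _
  show edit_words lst = edit_words_alt lst
  unfold edit_words edit_words_alt
  simpa using pv_fold_eq lst []
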